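-- pv_equiv track=rewrite | github.com/Jean-BaptisteAC/Oceanie | base_init.py | reformat_pop
-- ===== SOURCE A (Python) =====
-- def reformat_pop(c):
--     res=''
--     for ch in c:
--         try:
--             if ch!=',':
--                 i=int(ch)
--             res = res + ch
--         except ValueError:
--             break
--     return res
-- ===== SOURCE B (Python) =====
-- import re
--
-- def reformat_pop(c):
--     return re.match(r'[\d,]*', c).group(0)
-- ===== Notes on version B (the rewrite author's own statement) =====
-- stated objective: idiomatic
-- what changed: Replaces the char-by-char loop with try/except-ValueError break by a single regex match of the leading run of digit-or-comma characters.
import Mathlib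
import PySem

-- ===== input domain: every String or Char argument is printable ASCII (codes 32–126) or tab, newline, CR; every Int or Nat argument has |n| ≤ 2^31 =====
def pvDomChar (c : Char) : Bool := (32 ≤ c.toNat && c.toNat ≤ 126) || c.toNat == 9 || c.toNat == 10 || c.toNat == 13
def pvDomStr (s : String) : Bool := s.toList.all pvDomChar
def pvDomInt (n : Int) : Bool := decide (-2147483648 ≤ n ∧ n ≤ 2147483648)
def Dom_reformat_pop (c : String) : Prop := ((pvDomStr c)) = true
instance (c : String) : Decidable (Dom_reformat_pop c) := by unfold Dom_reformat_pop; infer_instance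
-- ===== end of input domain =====

-- B replaces the char-by-char loop with try/except break by a single regex match of the leading digit/comma run (idiomatic).


-- ===== PORT A =====
-- the for-loop with its try/except-ValueError break; `int(ch)` succeeds on a single
-- char exactly for the decimal digits '0'..'9' (exact on the ASCII domain Dom_)
def reformatPopLoop : List Char → String → String
  | [], res => res
  | ch :: rest, res =>
    if ch ≠ ',' ∧ ¬ ch.isDigit then res
    else reformatPopLoop rest (res ++ String.ofList [ch])

def reformat_pop (c : String) : String := reformatPopLoop c.toList ""

-- ===== PORT B =====
-- the regex [\d,]* applied at the start of the string: the longest leading run of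
-- digit-or-comma characters (= takeWhile; exact on the ASCII domain Dom_)
def reformat_pop_alt (c : String) : String :=
  String.ofList (c.toList.takeWhile fun ch => ch.isDigit || ch == ',')

-- ===== PRECONDITION & SPEC =====
def Spec_reformat_pop (c : String) (out : String) : Prop := out = reformat_pop_alt c
instance (c : String) (out : String) : Decidable (Spec_reformat_pop c out) := by unfold Spec_reformat_pop; infer_instance

-- ===== CLAIM (what is proved, stated in full; the proofs are below) =====
def Claim_equal_reformat_pop : Prop := ∀ (c : String), Dom_reformat_pop c → Spec_reformat_pop c (reformat_pop c)

-- ===== LEMMAS AND PROOFS =====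
theorem reformatPopLoop_eq (l : List Char) : ∀ (res : String),
    reformatPopLoop l res = res ++ String.ofList (l.takeWhile fun ch => ch.isDigit || ch == ',') := by
  induction l with
  | nil =>
    intro res
    rw [reformatPopLoop]
    apply String.ext
    simp
  | cons ch rest ih =>
    intro res
    by_cases h : ch = ',' ∨ ch.isDigit
    · have hc : ¬ (ch ≠ ',' ∧ ¬ ch.isDigit) := by tauto
      have ht : (ch.isDigit || ch == ',') = true := by
        rcases h with h | h <;> simp [h]
      rw [reformatPopLoop, if_neg hc, ih, List.takeWhile_cons, if_pos ht]
      rw [String.append_assoc]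
      congr 1
      apply String.ext
      simp
    · have h' := h
      rw [not_or] at h'
      have ht : (ch.isDigit || ch == ',') = false := by
        simp [h'.1, h'.2]
      have hc : (ch ≠ ',' ∧ ¬ ch.isDigit) := ⟨h'.1, by simpa using h'.2⟩
      rw [reformatPopLoop, if_pos hc, List.takeWhile_cons]
      simp [ht]

-- ===== VERDICT (by name: the statement is the Claim_ definition above) =====
theorem reformat_pop_spec : Claim_equal_reformat_pop := by
  intro c _
  unfold Spec_reformat_pop reformat_pop reformat_pop_alt
  simpa using reformatPopLoop_eq c.toList ""
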